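-- pv_equiv track=rewrite | github.com/marctjones/idlergear | src/idlergear/data_file_detector.py | group_references_by_file
-- ===== SOURCE A (Python) =====
-- from typing import Dict, List, Optional, Set, Tuple
--
-- def group_references_by_file(
--     references: List[Dict[str, any]]
-- ) -> Dict[str, List[Dict[str, any]]]:
--     """
--     Group file references by the file being referenced.
--
--     Args:
--         references: List of file reference dicts
--
--     Returns:
--         Dict mapping referenced_file -> [reference dicts]
--     """
--     grouped = {}
--
--     for ref in references:
--         path = ref["path"]
--         if path not in grouped:
--             grouped[path] = []
--         grouped[path].append(ref)
--
--     return grouped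
-- ===== SOURCE B (Python) =====
-- def group_references_by_file(references):
--     keys = list(dict.fromkeys(ref["path"] for ref in references))
--     return {p: [ref for ref in references if ref["path"] == p] for p in keys}
-- ===== Notes on version B (the rewrite author's own statement) =====
-- stated objective: alternative
-- what changed: Replaced the single accumulating dict-building pass with key discovery via ordered dedup (dict.fromkeys) followed by a per-key filtering comprehension over the whole list.
import Mathlib
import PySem

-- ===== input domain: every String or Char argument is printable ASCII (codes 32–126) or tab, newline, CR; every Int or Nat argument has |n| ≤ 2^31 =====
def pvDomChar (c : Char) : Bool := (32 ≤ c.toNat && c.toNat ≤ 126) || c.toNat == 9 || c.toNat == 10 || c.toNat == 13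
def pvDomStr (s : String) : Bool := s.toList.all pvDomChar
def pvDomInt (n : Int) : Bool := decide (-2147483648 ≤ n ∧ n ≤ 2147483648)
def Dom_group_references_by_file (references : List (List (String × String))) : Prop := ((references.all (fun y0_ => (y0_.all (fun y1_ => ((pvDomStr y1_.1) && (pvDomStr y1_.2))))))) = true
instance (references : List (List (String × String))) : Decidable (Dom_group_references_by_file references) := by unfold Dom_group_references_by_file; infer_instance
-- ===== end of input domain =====

-- B groups by first discovering the ordered distinct paths and then filtering the list per path,
-- instead of A's single accumulating dict-building pass; objective: alternative (not faster).

-- ===== PORT A =====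
-- ref["path"]: first value under key "path"; Pre_ guarantees it exists (else Python raises KeyError)
def pvPath (ref : List (String × String)) : String :=
  (PySem.Dict.getD (PySem.Dict.mk ref) "path" "")

def group_references_by_file (references : List (List (String × String))) : List (String × List (List (String × String))) :=
  (references.foldl (fun grouped ref =>
      let path := pvPath ref
      let grouped := if grouped.contains path then grouped else grouped.insert path []
      grouped.modify path [] (fun l => l ++ [ref]))
    PySem.Dict.empty).items

-- ===== PORT B =====
def group_references_by_file_alt (references : List (List (String × String))) : List (String × List (List (String × String))) :=
  (PySem.List.dedup (references.map pvPath)).map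
    (fun p => (p, references.filter (fun ref => pvPath ref == p)))

-- ===== PRECONDITION & SPEC =====
-- Pre_ excludes only inputs where some reference lacks a "path" key: there Python A raises KeyError.
def Pre_group_references_by_file (references : List (List (String × String))) : Prop :=
  (references.all (fun ref => ref.any (fun p => p.1 == "path"))) = true
instance (references : List (List (String × String))) : Decidable (Pre_group_references_by_file references) := by unfold Pre_group_references_by_file; infer_instance
def pvWitness_group_references_by_file : (List (List (String × String))) := [[("path", "a.py"), ("line", "3")], [("path", "b.py")]]

def Spec_group_references_by_file (references : List (List (String × String))) (out : List (String × List (List (String × String)))) : Prop := out = group_references_by_file_alt references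
instance (references : List (List (String × String))) (out : List (String × List (List (String × String)))) : Decidable (Spec_group_references_by_file references out) := by unfold Spec_group_references_by_file; infer_instance

-- ===== CLAIM (what is proved, stated in full; the proofs are below) =====
def Claim_equal_group_references_by_file : Prop := ∀ (references : List (List (String × String))), Dom_group_references_by_file references → Pre_group_references_by_file references → Spec_group_references_by_file references (group_references_by_file references)

-- ===== LEMMAS AND PROOFS =====

-- A's "if missing insert []; then append" step equals a single Dict.modify-with-default step
-- inserting the default then overwriting equals one insert, when the key is absent
theorem pv_insert_insert_absent {κ ν : Type} [BEq κ] [LawfulBEq κ] (d : PySem.Dict κ ν) (p : κ)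
    (h : d.contains p = false) (d0 v : ν) : (d.insert p d0).insert p v = d.insert p v := by
  have hc : (PySem.Dict.mk (d.items ++ [(p, d0)])).contains p = true := by
    simp [PySem.Dict.contains]
  simp only [PySem.Dict.insert, h, hc, Bool.false_eq_true, if_false, if_true]
  congr 1
  rw [List.map_append]
  congr 1
  · conv_rhs => rw [← List.map_id d.items]
    apply List.map_congr_left
    intro q hq
    have hq' : ¬ q.1 = p := by
      have hh := h
      simp only [PySem.Dict.contains, List.any_eq_false, beq_iff_eq] at hh
      exact hh q hq
    simp [hq']
  · simp

theorem pv_step_eq {κ ν : Type} [BEq κ] [LawfulBEq κ] (d : PySem.Dict κ ν) (p : κ) (d0 : ν) (f : ν → ν) :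
    (if d.contains p then d else d.insert p d0).modify p d0 f = d.modify p d0 f := by
  by_cases h : d.contains p = true
  · simp [h]
  · have h' : d.contains p = false := by simpa using h
    have hnone : d.get? p = none := (PySem.Dict.get?_eq_none_iff_contains d p).mpr h'
    simp only [h', Bool.false_eq_true, if_false, PySem.Dict.modify, PySem.Dict.getD,
      PySem.Dict.get?_insert_self, hnone, Option.getD_some, Option.getD_none]
    exact pv_insert_insert_absent d p h' d0 (f d0)

-- a Dict with Nodup keys is the map of getD over its keys
theorem pv_items_eq_map_keys {κ ν : Type} [BEq κ] [LawfulBEq κ] (d : PySem.Dict κ ν) (d0 : ν)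
    (h : d.keys.Nodup) : d.items = d.keys.map (fun k => (k, d.getD k d0)) := by
  obtain ⟨l⟩ := d
  induction l with
  | nil => rfl
  | cons q rest ih =>
    obtain ⟨k, v⟩ := q
    simp only [PySem.Dict.keys, List.map_cons, List.nodup_cons, List.mem_map] at h ⊢
    have htail : List.map (fun k1 => (k1, (PySem.Dict.mk ((k, v) :: rest)).getD k1 d0)) (rest.map (·.1))
        = List.map (fun k1 => (k1, (PySem.Dict.mk rest).getD k1 d0)) (rest.map (·.1)) := by
      apply List.map_congr_left
      intro x hx
      obtain ⟨⟨k', v'⟩, hk', rfl⟩ := List.mem_map.mp hx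
      have hne : (k == k') = false := by
        rcases Bool.eq_false_or_eq_true (k == k') with ht | hf
        · exact absurd ⟨(k', v'), hk', (eq_of_beq ht).symm⟩ h.1
        · exact hf
      simp [PySem.Dict.getD, PySem.Dict.get?, List.find?, hne]
    rw [htail]
    have ih' := ih (by exact h.2)
    simp only [PySem.Dict.keys] at ih'
    refine List.cons_eq_cons.mpr ⟨?_, ih'⟩
    simp [PySem.Dict.getD, PySem.Dict.get?]

theorem group_references_by_file_eq_modify_fold (references : List (List (String × String))) :
    group_references_by_file references =
      ((references.map (fun r => (pvPath r, r))).foldl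
        (fun d p => d.modify p.1 [] (fun l => l ++ [p.2])) PySem.Dict.empty).items := by
  unfold group_references_by_file
  rw [List.foldl_map]
  congr 1
  apply PySem.List.foldl_congr_mem
  intro d ref _
  exact pv_step_eq d (pvPath ref) [] (fun l => l ++ [ref])

-- ===== VERDICT (by name: the statement is the Claim_ definition above) =====
theorem group_references_by_file_spec : Claim_equal_group_references_by_file := by
  intro references _ _
  unfold Spec_group_references_by_file
  rw [group_references_by_file_eq_modify_fold]
  set l := references.map (fun r => (pvPath r, r)) with hl
  set d := l.foldl (fun d p => d.modify p.1 [] (fun ls => ls ++ [p.2])) PySem.Dict.empty with hd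
  have hkeys : d.keys = PySem.List.dedup (references.map pvPath) := by
    have := PySem.Dict.keys_foldl_modify_key l Prod.fst ([] : List (List (String × String)))
      (fun _ p => (fun ls => ls ++ [p.2])) PySem.Dict.empty
    rw [hd, this, PySem.List.dedup_eq_ofList]
    simp [PySem.Set.update, PySem.Set.ofList, PySem.Dict.keys, PySem.Dict.empty, hl, List.map_map]
    rfl
  have hnodup : d.keys.Nodup := by
    rw [hd]
    exact PySem.Dict.nodup_keys_foldl_modify_key l Prod.fst _ _ _ (by simp [PySem.Dict.keys, PySem.Dict.empty])
  have hget : ∀ c, d.getD c [] = references.filter (fun ref => pvPath ref == c) := by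
    intro c
    rw [hd, PySem.Dict.getD_foldl_modify_append l PySem.Dict.empty c]
    simp only [PySem.Dict.getD, PySem.Dict.empty, PySem.Dict.get?, List.find?, Option.map_none,
      Option.getD_none, List.nil_append, hl, List.filter_map]
    rw [List.map_map]
    simp [Function.comp_def]
  rw [pv_items_eq_map_keys d ([] : List (List (String × String))) hnodup, hkeys]
  unfold group_references_by_file_alt
  exact List.map_congr_left (fun p _ => by rw [hget p])
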